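-- pv_equiv track=rewrite | github.com/v4nilla1ce/dna-sequenzer | dnaClass.py | hydrogenBridgeCountDna
-- ===== SOURCE A (Python) =====
-- def hydrogenBridgeCountDna(sequence):
--     result = 0
--     for i in sequence:
--         if i == 'A' or i == 'T':
--             result += 2
--         elif i == 'C' or i == 'G':
--             result += 3
--         else:
--             pass
--     return result
-- ===== SOURCE B (Python) =====
-- def hydrogenBridgeCountDna(sequence):
--     counts = {}
--     for ch in sequence:
--         counts[ch] = counts.get(ch, 0) + 1
--     return 2 * (counts.get('A', 0) + counts.get('T', 0)) \
--          + 3 * (counts.get('C', 0) + counts.get('G', 0))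
-- ===== Notes on version B (the rewrite author's own statement) =====
-- stated objective: alternative
-- what changed: Replaces the per-character if/elif accumulation with a tally-then-combine pass: build a frequency table of the sequence once, then compute 2*(#A+#T) + 3*(#C+#G) in a single arithmetic step.
import Mathlib
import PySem

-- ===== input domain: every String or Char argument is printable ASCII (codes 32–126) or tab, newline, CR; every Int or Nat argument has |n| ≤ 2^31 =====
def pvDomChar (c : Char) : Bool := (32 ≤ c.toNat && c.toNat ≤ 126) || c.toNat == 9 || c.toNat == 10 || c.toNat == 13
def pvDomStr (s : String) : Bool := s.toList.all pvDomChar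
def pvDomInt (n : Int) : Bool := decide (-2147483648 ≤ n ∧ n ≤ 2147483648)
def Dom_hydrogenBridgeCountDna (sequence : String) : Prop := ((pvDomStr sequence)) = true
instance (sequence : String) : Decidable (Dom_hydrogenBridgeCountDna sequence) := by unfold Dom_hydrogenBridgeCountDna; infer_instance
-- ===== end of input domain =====

-- B tallies a frequency table of the sequence once, then combines the four
-- nucleotide counts arithmetically (2*(#A+#T) + 3*(#C+#G)) instead of A's
-- per-character if/elif accumulation.


-- ===== PORT A =====
def hydrogenBridgeCountDna (sequence : String) : Int :=
  sequence.toList.foldl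
    (fun result i =>
      if i == 'A' || i == 'T' then result + 2
      else if i == 'C' || i == 'G' then result + 3
      else result)
    0

-- ===== PORT B =====
def hydrogenBridgeCountDna_alt (sequence : String) : Int :=
  let counts : PySem.Dict Char Int :=
    sequence.toList.foldl (fun d ch => d.insert ch (d.getD ch 0 + 1)) PySem.Dict.empty
  2 * (counts.getD 'A' 0 + counts.getD 'T' 0)
    + 3 * (counts.getD 'C' 0 + counts.getD 'G' 0)

-- ===== PRECONDITION & SPEC =====
def Spec_hydrogenBridgeCountDna (sequence : String) (out : Int) : Prop := out = hydrogenBridgeCountDna_alt sequence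
instance (sequence : String) (out : Int) : Decidable (Spec_hydrogenBridgeCountDna sequence out) := by unfold Spec_hydrogenBridgeCountDna; infer_instance

-- ===== CLAIM (what is proved, stated in full; the proofs are below) =====
def Claim_equal_hydrogenBridgeCountDna : Prop := ∀ (sequence : String), Dom_hydrogenBridgeCountDna sequence → Spec_hydrogenBridgeCountDna sequence (hydrogenBridgeCountDna sequence)

-- ===== LEMMAS AND PROOFS =====

-- A's loop, over any accumulator: a + 2*(#A+#T) + 3*(#C+#G).
theorem foldA_eq (l : List Char) (a : Int) :
    l.foldl
      (fun result i =>
        if i == 'A' || i == 'T' then result + 2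
        else if i == 'C' || i == 'G' then result + 3
        else result) a
    = a + 2 * ((l.count 'A' : Int) + (l.count 'T' : Int))
        + 3 * ((l.count 'C' : Int) + (l.count 'G' : Int)) := by
  induction l generalizing a with
  | nil => simp
  | cons c t ih =>
    simp only [List.foldl_cons, ih, List.count_cons]
    by_cases hA : c = 'A' <;> by_cases hT : c = 'T' <;>
      by_cases hC : c = 'C' <;> by_cases hG : c = 'G' <;>
      simp_all <;> ring

-- ===== VERDICT (by name: the statement is the Claim_ definition above) =====
theorem hydrogenBridgeCountDna_spec : Claim_equal_hydrogenBridgeCountDna := by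
  intro s _
  unfold Spec_hydrogenBridgeCountDna hydrogenBridgeCountDna hydrogenBridgeCountDna_alt
  simp only [PySem.Dict.getD_foldl_insert_add_one, foldA_eq]
  simp [PySem.Dict.getD, PySem.Dict.empty, PySem.Dict.get?]
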